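-- pv_equiv track=rewrite | github.com/mkXultra/mew | src/mew/acceptance.py | _without_spans
-- ===== SOURCE A (Python) =====
-- def _without_spans(value: str, spans: list[tuple[int, int]]) -> str:
--     if not spans:
--         return value
--     chars = list(value)
--     for start, end in spans:
--         for index in range(max(0, start), min(len(chars), end)):
--             chars[index] = " "
--     return "".join(chars)
-- ===== SOURCE B (Python) =====
-- def _without_spans(value: str, spans: list[tuple[int, int]]) -> str:
--     n = len(value)
--     delta = [0] * (n + 1)
--     for start, end in spans:
--         lo = min(max(start, 0), n)
--         hi = min(max(end, 0), n)
--         if lo < hi: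
--             delta[lo] += 1
--             delta[hi] -= 1
--     out = []
--     depth = 0
--     for index, char in enumerate(value):
--         depth += delta[index]
--         out.append(" " if depth > 0 else char)
--     return "".join(out)
-- ===== Notes on version B (the rewrite author's own statement) =====
-- stated objective: alternative
-- what changed: Instead of mutating a per-character list by walking every index of each span, B builds a +1/-1 difference array from the clamped span endpoints and does one sweep over the characters with a running coverage depth, emitting a space while the depth is positive.
import Mathlib
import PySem

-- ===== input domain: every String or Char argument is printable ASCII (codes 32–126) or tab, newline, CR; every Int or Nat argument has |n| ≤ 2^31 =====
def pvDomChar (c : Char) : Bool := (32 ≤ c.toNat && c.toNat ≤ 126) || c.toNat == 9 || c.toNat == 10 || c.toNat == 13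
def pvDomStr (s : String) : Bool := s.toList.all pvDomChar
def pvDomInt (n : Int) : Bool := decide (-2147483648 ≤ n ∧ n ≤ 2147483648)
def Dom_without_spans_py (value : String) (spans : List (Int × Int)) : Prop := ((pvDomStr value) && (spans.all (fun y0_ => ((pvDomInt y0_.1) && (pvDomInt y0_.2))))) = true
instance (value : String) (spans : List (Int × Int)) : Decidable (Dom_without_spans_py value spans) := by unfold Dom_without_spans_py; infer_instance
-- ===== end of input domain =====

-- B replaces A's per-span mutation of a char list with a difference-array sweep:
-- clamp each span into a +1/-1 delta table, then one pass over the characters keeps a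
-- running coverage depth and emits a space exactly while it is positive (alternative algorithm).

-- ===== PORT A =====
-- literal transliteration of A: copy the chars, then for each span set every
-- index of range(max(0,start), min(len(chars),end)) to ' ', then join.
def without_spans_py (value : String) (spans : List (Int × Int)) : String :=
  if spans = [] then value
  else
    String.mk (spans.foldl (fun cs se =>
      (PySem.List.pyRange (max 0 se.1) (min (cs.length : Int) se.2) 1).foldl
        (fun cs2 i => cs2.set i.toNat ' ') cs) value.toList)

-- ===== PORT B =====
-- literal transliteration of B's first loop: delta = [0]*(n+1); for each span clamp
-- (start, end) into [0, n] and, if nonempty, delta[lo] += 1; delta[hi] -= 1.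
def pvBuildDelta (n : Nat) (spans : List (Int × Int)) : List Int :=
  spans.foldl (fun d se =>
    let lo := (min (max se.1 0) (n : Int)).toNat
    let hi := (min (max se.2 0) (n : Int)).toNat
    if lo < hi then
      let d1 := d.set lo (d.getD lo 0 + 1)
      d1.set hi (d1.getD hi 0 - 1)
    else d) (List.replicate (n + 1) 0)

-- literal transliteration of B's second loop: sweep enumerate(value) with a running
-- depth, appending ' ' while depth > 0, else the character; then join.
def without_spans_py_alt (value : String) (spans : List (Int × Int)) : String :=
  let n := value.toList.length
  let delta := pvBuildDelta n spans
  String.mk ((PySem.List.enumerate value.toList 0).foldl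
    (fun acc ic =>
      let depth := acc.2 + delta.getD ic.1.toNat 0
      (acc.1 ++ [if 0 < depth then ' ' else ic.2], depth)) ([], 0)).1

-- ===== PRECONDITION & SPEC =====
def Spec_without_spans_py (value : String) (spans : List (Int × Int)) (out : String) : Prop := out = without_spans_py_alt value spans
instance (value : String) (spans : List (Int × Int)) (out : String) : Decidable (Spec_without_spans_py value spans out) := by unfold Spec_without_spans_py; infer_instance

-- ===== CLAIM (what is proved, stated in full; the proofs are below) =====
def Claim_equal_without_spans_py : Prop := ∀ (value : String) (spans : List (Int × Int)), Dom_without_spans_py value spans → Spec_without_spans_py value spans (without_spans_py value spans)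

-- ===== LEMMAS AND PROOFS =====

-- ---- A-side characterisation ----

-- inner loop: element j after blanking range [a, b) (a ≥ 0)
theorem pv_inner_get? (n : Nat) : ∀ (a b : Int), (b - a).toNat = n → 0 ≤ a →
    ∀ (cs : List Char) (j : Nat),
    ((PySem.List.pyRange a b 1).foldl (fun cs2 i => cs2.set i.toNat ' ') cs)[j]? =
      if a ≤ (j : Int) ∧ (j : Int) < b then cs[j]?.map (fun _ => ' ') else cs[j]? := by
  induction n with
  | zero =>
    intro a b hn ha cs j
    have hba : b ≤ a := by omega
    rw [PySem.List.pyRange_one_eq_nil hba]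
    simp only [List.foldl_nil]
    rw [if_neg (by omega)]
  | succ n ih =>
    intro a b hn ha cs j
    have hab : a < b := by omega
    rw [PySem.List.pyRange_one_cons hab]
    simp only [List.foldl_cons]
    rw [ih (a + 1) b (by omega) (by omega)]
    by_cases hja : (j : Int) = a
    · have hj : j = a.toNat := by omega
      rw [if_neg (by omega), if_pos (by omega), hj]
      rw [List.getElem?_set]
      by_cases hlt : a.toNat < cs.length
      · simp [hlt]
      · simp [hlt]
    · have hset : (cs.set a.toNat ' ')[j]? = cs[j]? := by
        rw [List.getElem?_set]
        rw [if_neg (by omega)]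
      rw [hset]
      by_cases h1 : a + 1 ≤ (j : Int) ∧ (j : Int) < b
      · rw [if_pos h1, if_pos (by omega)]
      · rw [if_neg h1, if_neg (by omega)]

-- outer loop: element j after processing all spans
theorem pv_outer_get? (spans : List (Int × Int)) : ∀ (cs : List Char) (j : Nat),
    (spans.foldl (fun cs se =>
      (PySem.List.pyRange (max 0 se.1) (min (cs.length : Int) se.2) 1).foldl
        (fun cs2 i => cs2.set i.toNat ' ') cs) cs)[j]? =
      if spans.any (fun se => decide (se.1 ≤ (j : Int) ∧ (j : Int) < se.2)) then
        cs[j]?.map (fun _ => ' ') else cs[j]? := by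
  induction spans with
  | nil => intro cs j; simp
  | cons se rest ih =>
    intro cs j
    simp only [List.foldl_cons, List.any_cons]
    rw [ih]
    have hstep := pv_inner_get? ((min (cs.length : Int) se.2) - (max 0 se.1)).toNat
      (max 0 se.1) (min (cs.length : Int) se.2) rfl (by omega) cs j
    by_cases hjlen : j < cs.length
    · have hsome : ∃ c, cs[j]? = some c := ⟨cs[j], List.getElem?_eq_getElem hjlen⟩
      obtain ⟨c, hc⟩ := hsome
      by_cases hcov : se.1 ≤ (j : Int) ∧ (j : Int) < se.2
      · have : (max 0 se.1 ≤ (j : Int) ∧ (j : Int) < min (cs.length : Int) se.2) := by omega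
        rw [if_pos this] at hstep
        rw [hstep, hc]
        simp [hcov]
      · have : ¬(max 0 se.1 ≤ (j : Int) ∧ (j : Int) < min (cs.length : Int) se.2) := by omega
        rw [if_neg this] at hstep
        rw [hstep]
        simp only [decide_eq_false hcov, Bool.false_or]
    · have hnone : cs[j]? = none := List.getElem?_eq_none (by omega)
      have : ¬(max 0 se.1 ≤ (j : Int) ∧ (j : Int) < min (cs.length : Int) se.2) := by omega
      rw [if_neg this] at hstep
      rw [hstep, hnone]
      simp

-- ---- B-side characterisation ----

def pvPrefix (d : List Int) (m : Nat) : Int := ((List.range m).map (fun k => d.getD k 0)).sum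
theorem pvPrefix_succ (d : List Int) (m : Nat) :
    pvPrefix d (m + 1) = pvPrefix d m + d.getD m 0 := by
  simp [pvPrefix, List.range_succ]
theorem pv_getD_set (d : List Int) (i k : Nat) (x : Int) :
    (d.set i x).getD k 0 = if i = k ∧ i < d.length then x else d.getD k 0 := by
  simp only [List.getD_eq_getElem?_getD, List.getElem?_set]
  by_cases h : i = k
  · subst h
    by_cases hk : i < d.length
    · simp [hk]
    · simp [hk]
  · simp [h]
theorem pvPrefix_set (d : List Int) (i : Nat) (x : Int) (hi : i < d.length) :
    ∀ m, pvPrefix (d.set i x) m = pvPrefix d m + (if i < m then x - d.getD i 0 else 0) := by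
  intro m
  induction m with
  | zero => simp [pvPrefix]
  | succ m ihm =>
    rw [pvPrefix_succ, pvPrefix_succ, ihm, pv_getD_set]
    by_cases him : i = m
    · subst him
      rw [if_pos (⟨rfl, hi⟩ : i = i ∧ i < d.length), if_neg (by omega), if_pos (by omega)]
      ring
    · rw [if_neg (by omega : ¬(i = m ∧ i < d.length))]
      by_cases h2 : i < m
      · rw [if_pos h2, if_pos (by omega)]
        ring
      · rw [if_neg h2, if_neg (by omega)]
        ring

theorem pv_step (n j : Nat) (hj : j < n) (s e : Int) (d : List Int) (hd : d.length = n + 1) :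
    pvPrefix (if (min (max s 0) (n:Int)).toNat < (min (max e 0) (n:Int)).toNat then
        (d.set (min (max s 0) (n:Int)).toNat (d.getD (min (max s 0) (n:Int)).toNat 0 + 1)).set (min (max e 0) (n:Int)).toNat
          ((d.set (min (max s 0) (n:Int)).toNat (d.getD (min (max s 0) (n:Int)).toNat 0 + 1)).getD (min (max e 0) (n:Int)).toNat 0 - 1)
      else d) (j+1)
      = pvPrefix d (j+1) + (if s ≤ (j:Int) ∧ (j:Int) < e then 1 else 0) := by
  split
  · next hguard =>
    rw [pvPrefix_set _ _ _ (by rw [List.length_set, hd]; omega)]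
    rw [pvPrefix_set _ _ _ (by rw [hd]; omega)]
    have hne : ¬((min (max s 0) (n:Int)).toNat = (min (max e 0) (n:Int)).toNat ∧ (min (max s 0) (n:Int)).toNat < d.length) := by
      omega
    rw [pv_getD_set, if_neg hne]
    by_cases hcov : s ≤ (j:Int) ∧ (j:Int) < e
    · have hL : (min (max s 0) (n:Int)).toNat < j + 1 := by omega
      have hH : ¬((min (max e 0) (n:Int)).toNat < j + 1) := by omega
      rw [if_pos hcov, if_pos hL, if_neg hH]
      ring
    · rw [if_neg hcov]
      by_cases h1 : (min (max s 0) (n:Int)).toNat < j + 1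
      · have hH : (min (max e 0) (n:Int)).toNat < j + 1 := by omega
        rw [if_pos h1, if_pos hH]
        ring
      · have hH : ¬((min (max e 0) (n:Int)).toNat < j + 1) := by omega
        rw [if_neg h1, if_neg hH]
        ring
  · next hguard =>
    have hcov : ¬(s ≤ (j:Int) ∧ (j:Int) < e) := by omega
    rw [if_neg hcov]
    ring

theorem pv_aux (n j : Nat) (hj : j < n) : ∀ (sp : List (Int × Int)) (d : List Int), d.length = n + 1 →
    pvPrefix (sp.foldl (fun d se =>
        let lo := (min (max se.1 0) (n : Int)).toNat
        let hi := (min (max se.2 0) (n : Int)).toNat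
        if lo < hi then
          let d1 := d.set lo (d.getD lo 0 + 1)
          d1.set hi (d1.getD hi 0 - 1)
        else d) d) (j + 1) =
      pvPrefix d (j + 1) + (sp.countP (fun se => decide (se.1 ≤ (j : Int) ∧ (j : Int) < se.2)) : Int) := by
  intro sp
  induction sp with
  | nil => intro d _; simp
  | cons se rest ih =>
    intro d hd
    simp only [List.foldl_cons]
    have hlen : (if (min (max se.1 0) (n : Int)).toNat < (min (max se.2 0) (n : Int)).toNat then
        (d.set (min (max se.1 0) (n:Int)).toNat (d.getD (min (max se.1 0) (n:Int)).toNat 0 + 1)).set (min (max se.2 0) (n:Int)).toNat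
          ((d.set (min (max se.1 0) (n:Int)).toNat (d.getD (min (max se.1 0) (n:Int)).toNat 0 + 1)).getD (min (max se.2 0) (n:Int)).toNat 0 - 1)
      else d).length = n + 1 := by
      split <;> simp [hd]
    rw [ih _ hlen, List.countP_cons, pv_step n j hj se.1 se.2 d hd]
    push_cast
    by_cases hcov : se.1 ≤ (j : Int) ∧ (j : Int) < se.2
    · simp [hcov]
      ring
    · simp [hcov]

theorem pvBuildDelta_prefix (n : Nat) (spans : List (Int × Int)) (j : Nat) (hj : j < n) :
    pvPrefix (pvBuildDelta n spans) (j + 1) =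
      (spans.countP (fun se => decide (se.1 ≤ (j : Int) ∧ (j : Int) < se.2)) : Int) := by
  unfold pvBuildDelta
  rw [pv_aux n j hj spans (List.replicate (n + 1) 0) (by simp)]
  have h0 : pvPrefix (List.replicate (n + 1) (0 : Int)) (j + 1) = 0 := by
    unfold pvPrefix
    rw [List.map_congr_left (g := fun _ => (0 : Int))
      (by intro k _; simp [List.getD_eq_getElem?_getD])]
    simp
  rw [h0]
  ring

-- the sweep, described structurally
def pvMark (delta : List Int) : List Char → Nat → List Char
  | [], _ => []
  | c :: rest, s => (if 0 < pvPrefix delta (s + 1) then ' ' else c) :: pvMark delta rest (s + 1)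

theorem pv_sweep (delta : List Int) : ∀ (xs : List Char) (s : Nat) (out : List Char),
    ((PySem.List.enumerate xs (s : Int)).foldl
      (fun acc ic =>
        let depth := acc.2 + delta.getD ic.1.toNat 0
        (acc.1 ++ [if 0 < depth then ' ' else ic.2], depth)) (out, pvPrefix delta s)).1
    = out ++ pvMark delta xs s := by
  intro xs
  induction xs with
  | nil => intro s out; simp [PySem.List.enumerate_nil, pvMark]
  | cons c rest ih =>
    intro s out
    rw [PySem.List.enumerate_cons]
    simp only [List.foldl_cons, Int.toNat_natCast]
    rw [← pvPrefix_succ]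
    have hc : ((s : Int) + 1) = ((s + 1 : Nat) : Int) := by push_cast; ring
    rw [hc, ih (s + 1)]
    simp [pvMark, List.append_assoc]

theorem pv_sweep0 (delta : List Int) (xs : List Char) :
    ((PySem.List.enumerate xs 0).foldl
      (fun acc ic =>
        let depth := acc.2 + delta.getD ic.1.toNat 0
        (acc.1 ++ [if 0 < depth then ' ' else ic.2], depth)) (([] : List Char), (0 : Int))).1
    = pvMark delta xs 0 := by
  have h := pv_sweep delta xs 0 []
  have h0 : pvPrefix delta 0 = 0 := by simp [pvPrefix]
  rw [h0] at h
  simpa using h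

theorem pvMark_getElem? (delta : List Int) : ∀ (xs : List Char) (s j : Nat),
    (pvMark delta xs s)[j]? =
      xs[j]?.map (fun c => if 0 < pvPrefix delta (s + j + 1) then ' ' else c) := by
  intro xs
  induction xs with
  | nil => intro s j; simp [pvMark]
  | cons c rest ih =>
    intro s j
    cases j with
    | zero => simp [pvMark]
    | succ j =>
      simp only [pvMark, List.getElem?_cons_succ]
      rw [ih (s + 1) j]
      have harith : s + 1 + j + 1 = s + (j + 1) + 1 := by omega
      rw [harith]

-- ===== VERDICT (by name: the statement is the Claim_ definition above) =====
theorem without_spans_py_spec : Claim_equal_without_spans_py := by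
  unfold Claim_equal_without_spans_py
  intro value spans _
  unfold Spec_without_spans_py
  have hA : without_spans_py value spans = String.mk (spans.foldl (fun cs se =>
      (PySem.List.pyRange (max 0 se.1) (min (cs.length : Int) se.2) 1).foldl
        (fun cs2 i => cs2.set i.toNat ' ') cs) value.toList) := by
    unfold without_spans_py
    by_cases hsp : spans = []
    · subst hsp
      simp only [List.foldl_nil]
      exact (String.ofList_toList).symm
    · rw [if_neg hsp]
  rw [hA]
  unfold without_spans_py_alt
  dsimp only
  rw [pv_sweep0]
  apply congrArg
  apply List.ext_getElem?
  intro j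
  rw [pv_outer_get? spans value.toList j, pvMark_getElem?]
  simp only [Nat.zero_add]
  by_cases hj : j < value.toList.length
  · rw [pvBuildDelta_prefix value.toList.length spans j hj]
    rw [List.getElem?_eq_getElem hj]
    simp only [Option.map_some]
    have hiff : (0 : Int) < (spans.countP (fun se => decide (se.1 ≤ (j : Int) ∧ (j : Int) < se.2)) : Int) ↔
        spans.any (fun se => decide (se.1 ≤ (j : Int) ∧ (j : Int) < se.2)) = true := by
      rw [Int.natCast_pos, List.countP_pos_iff, List.any_eq_true]
    by_cases hany : spans.any (fun se => decide (se.1 ≤ (j : Int) ∧ (j : Int) < se.2)) = true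
    · rw [if_pos hany, if_pos (hiff.mpr hany)]
    · rw [if_neg hany, if_neg (fun h => hany (hiff.mp h))]
  · rw [List.getElem?_eq_none (by omega)]
    split <;> simp
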